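-- pv_equiv track=rewrite | github.com/rf-iasys/OEIS | OEIS_A079524.py | generate_a079524_indices
-- ===== SOURCE A (Python) =====
-- import math
--
-- def is_perfect_square(n: int) -> bool:
--     root = int(math.isqrt(n))
--     return root * root == n
--
-- def compute_max_y(n_start: int, n_limit: int) -> dict[int,int]:
--     """Compute max y(x) up to n_limit to reduce memory."""
--     max_y = {}
--     n_limit_isqrt = math.isqrt(n_limit)
--     for a in range(0, n_limit_isqrt):
--         for b in range(a + 1, n_limit - a + 1):
--             x = a * b - a - b
--             if x < n_start or x == 1:
--                 continue
--             y = x * abs(a*a + b)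
--             if y > max_y.get(x, 0):
--                 max_y[x] = y
--     return max_y
--
-- def generate_a079524_indices(n_start: int, n_end: int) -> list[int]:
--     """
--     Compute A079524 indices from combinatorial sequence:
--     indices where y + 9 is NOT a perfect square, stopping at index n_end.
--     """
--     max_y = compute_max_y(n_start, n_end*2)  # generate enough values
--     a079524_indices = []
--     idx = 0
--     for x in sorted(max_y.keys()):
--         value = max_y[x]
--         idx += 1
--         if idx > n_end:  # stop at index limit
--             break
--         if not is_perfect_square(value + 9):
--             a079524_indices.append(idx)
--     return a079524_indices
-- ===== SOURCE B (Python) =====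
-- import math
--
-- def generate_a079524_indices(n_start: int, n_end: int) -> list[int]:
--     """Scan candidate indices x in increasing order and recover, per x, the
--     admissible (a, b) pairs from the factor identity x + 1 = (a-1)(b-1),
--     stopping as soon as n_end keys have been seen."""
--     L = 2 * n_end
--     R = math.isqrt(L) if L >= 0 else 0
--     hi = (R - 2) * (L - R) - 1 if R >= 3 else 1  # largest reachable key
--     res = []
--     count = 0
--     x = max(n_start, 2)
--     while x <= hi and count < n_end:
--         best = 0
--         for a in range(2, R):
--             if (x + 1) % (a - 1) == 0:
--                 b = (x + 1) // (a - 1) + 1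
--                 if a + 1 <= b <= L - a:
--                     if a * a + b > best:
--                         best = a * a + b
--         if best > 0:
--             count += 1
--             v = x * best + 9
--             r = math.isqrt(v)
--             if r * r != v:
--                 res.append(count)
--         x += 1
--     return res
-- ===== Notes on version B (the rewrite author's own statement) =====
-- stated objective: faster
-- what changed: Instead of scanning all (a,b) pairs into a dict keyed by x=a*b-a-b and sorting its keys, B scans candidate keys x in increasing order, recovers the admissible pairs of each x from the factorisation x+1=(a-1)(b-1) by a divisor scan, and stops as soon as n_end keys have been produced.
import Mathlib
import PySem

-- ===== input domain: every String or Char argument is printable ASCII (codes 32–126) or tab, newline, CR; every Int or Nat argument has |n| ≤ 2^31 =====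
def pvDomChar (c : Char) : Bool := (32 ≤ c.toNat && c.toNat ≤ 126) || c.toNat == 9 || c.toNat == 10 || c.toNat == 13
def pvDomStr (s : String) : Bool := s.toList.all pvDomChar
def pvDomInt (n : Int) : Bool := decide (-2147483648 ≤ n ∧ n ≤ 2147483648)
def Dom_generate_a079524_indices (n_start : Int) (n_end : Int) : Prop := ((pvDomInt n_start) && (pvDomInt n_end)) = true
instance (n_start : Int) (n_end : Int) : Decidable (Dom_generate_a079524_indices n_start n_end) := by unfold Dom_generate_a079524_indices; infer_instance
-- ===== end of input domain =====

-- B replaces A's full (a,b) double scan + dict + sort by an increasing scan over candidate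
-- indices x that recovers the pairs from the factorisation x+1 = (a-1)(b-1) and stops after
-- the first n_end keys (objective: faster, measured constant-factor speed-up).

-- ===== PORT A =====
-- math.isqrt n; exact for 0 ≤ n (every call site has a nonnegative argument under Pre_)
def pvIsqrt (n : Int) : Int := (Nat.sqrt n.toNat : Int)

-- is_perfect_square
def pvIsSq (n : Int) : Bool := pvIsqrt n * pvIsqrt n == n

-- body of compute_max_y's inner loop
def pvStep (n_start : Int) (d : PySem.Dict Int Int) (a b : Int) : PySem.Dict Int Int :=
  let x := a * b - a - b
  if x < n_start ∨ x = 1 then d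
  else
    let y := x * |a * a + b|
    if d.getD x 0 < y then d.insert x y else d

def pvComputeMaxY (n_start : Int) (n_limit : Int) : PySem.Dict Int Int :=
  let r := pvIsqrt n_limit
  (PySem.List.pyRange 0 r).foldl (fun d a =>
    (PySem.List.pyRange (a + 1) (n_limit - a + 1)).foldl (fun d b => pvStep n_start d a b) d)
    PySem.Dict.empty

-- the 'for x in sorted(...)' loop with its break; max_y[x] is ported as getD x 0 (x is a key)
def pvALoop (n_end : Int) (d : PySem.Dict Int Int) : List Int → Int → List Int → List Int
  | [], _, acc => acc
  | x :: rest, idx, acc =>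
    if n_end < idx + 1 then acc
    else if pvIsSq (d.getD x 0 + 9) then pvALoop n_end d rest (idx + 1) acc
    else pvALoop n_end d rest (idx + 1) (acc ++ [idx + 1])

def generate_a079524_indices (n_start : Int) (n_end : Int) : List Int :=
  let max_y := pvComputeMaxY n_start (n_end * 2)
  pvALoop n_end max_y (PySem.List.sorted max_y.keys (fun k => k)) 0 []

-- ===== PORT B =====
-- the 'for a in range(2, R)' scan computing the best a*a+b over factor pairs of x+1
def pvBestOf (L R x : Int) : Int :=
  (PySem.List.pyRange 2 R).foldl (fun best a =>
    if PySem.Int.mod (x + 1) (a - 1) = 0 then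
      let b := PySem.Int.floordiv (x + 1) (a - 1) + 1
      if a + 1 ≤ b ∧ b ≤ L - a then
        (if best < a * a + b then a * a + b else best)
      else best
    else best) 0

-- the while loop
def pvBLoop (n_end L R hi : Int) (x count : Int) (res : List Int) : List Int :=
  if h : x ≤ hi ∧ count < n_end then
    let best := pvBestOf L R x
    if 0 < best then
      let v := x * best + 9
      let r := pvIsqrt v
      if r * r = v then pvBLoop n_end L R hi (x + 1) (count + 1) res
      else pvBLoop n_end L R hi (x + 1) (count + 1) (res ++ [count + 1])
    else pvBLoop n_end L R hi (x + 1) count res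
  else res
termination_by (hi + 1 - x).toNat
decreasing_by all_goals omega

def generate_a079524_indices_alt (n_start : Int) (n_end : Int) : List Int :=
  let L := 2 * n_end
  let R := if 0 ≤ L then pvIsqrt L else 0
  let hi := if 3 ≤ R then (R - 2) * (L - R) - 1 else 1
  pvBLoop n_end L R hi (max n_start 2) 0 []

-- ===== PRECONDITION & SPEC =====
-- A calls math.isqrt(n_end*2), which raises ValueError for n_end < 0; Pre_ excludes exactly that.
def Pre_generate_a079524_indices (n_start : Int) (n_end : Int) : Prop := 0 ≤ n_end
instance (n_start : Int) (n_end : Int) : Decidable (Pre_generate_a079524_indices n_start n_end) := by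
  unfold Pre_generate_a079524_indices; infer_instance

def pvWitness_generate_a079524_indices : Int × Int := (0, 6)

def Spec_generate_a079524_indices (n_start : Int) (n_end : Int) (out : List Int) : Prop :=
  out = generate_a079524_indices_alt n_start n_end
instance (n_start : Int) (n_end : Int) (out : List Int) : Decidable (Spec_generate_a079524_indices n_start n_end out) := by
  unfold Spec_generate_a079524_indices; infer_instance

-- ===== CLAIM (what is proved, stated in full; the proofs are below) =====
def Claim_equal_generate_a079524_indices : Prop := ∀ (n_start : Int) (n_end : Int), Dom_generate_a079524_indices n_start n_end → Pre_generate_a079524_indices n_start n_end → Spec_generate_a079524_indices n_start n_end (generate_a079524_indices n_start n_end)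

-- ===== LEMMAS AND PROOFS =====

-- proof-side views of the loop bodies
def pvKey (p : Int × Int) : Int := p.1 * p.2 - p.1 - p.2
def pvY (p : Int × Int) : Int := pvKey p * |p.1 * p.1 + p.2|
def pvG (n_start x : Int) (m : Int) (p : Int × Int) : Int :=
  if ¬(pvKey p < n_start ∨ pvKey p = 1) ∧ pvKey p = x then max m (pvY p) else m
def pvPairs (L R : Int) : List (Int × Int) :=
  (PySem.List.pyRange 0 R).flatMap (fun a =>
    (PySem.List.pyRange (a + 1) (L - a + 1)).map (fun b => (a, b)))
def pvStepP (n_start : Int) (d : PySem.Dict Int Int) (p : Int × Int) : PySem.Dict Int Int :=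
  pvStep n_start d p.1 p.2
def pvPosInv (d : PySem.Dict Int Int) : Prop := ∀ x : Int, x ∈ d.keys ↔ 0 < d.getD x 0

-- one step of the dict loop, seen through getD x
lemma pvStep_getD (n_start x : Int) (d : PySem.Dict Int Int) (p : Int × Int) :
    (pvStepP n_start d p).getD x 0 = pvG n_start x (d.getD x 0) p := by
  rcases p with ⟨a, b⟩
  simp only [pvStepP, pvStep, pvG, pvKey, pvY]
  by_cases hc : a * b - a - b < n_start ∨ a * b - a - b = 1
  · simp [hc]
  · by_cases hk : a * b - a - b = x
    · subst hk
      by_cases hlt : d.getD (a * b - a - b) 0 < (a * b - a - b) * |a * a + b|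
      · simp [hc, hlt, PySem.Dict.getD_insert_self, max_eq_right (le_of_lt hlt)]
      · simp [hc, hlt, max_eq_left (not_lt.mp hlt)]
    · have hne : x ≠ a * b - a - b := fun h => hk h.symm
      by_cases hlt : d.getD (a * b - a - b) 0 < (a * b - a - b) * |a * a + b|
      · simp [hc, hk, hlt, PySem.Dict.getD_insert_of_ne _ _ _ hne]
      · simp [hc, hk, hlt]

lemma pvFold_getD (n_start x : Int) (l : List (Int × Int)) (d : PySem.Dict Int Int) :
    (l.foldl (pvStepP n_start) d).getD x 0 = l.foldl (pvG n_start x) (d.getD x 0) := by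
  induction l generalizing d with
  | nil => rfl
  | cons p l ih => simp only [List.foldl_cons, ih, pvStep_getD]

lemma pvFold_nodup (n_start : Int) (l : List (Int × Int)) (d : PySem.Dict Int Int)
    (h : d.keys.Nodup) : (l.foldl (pvStepP n_start) d).keys.Nodup := by
  induction l generalizing d with
  | nil => exact h
  | cons p l ih =>
    refine ih _ ?_
    rcases p with ⟨a, b⟩
    simp only [pvStepP, pvStep]
    split_ifs <;> first | exact h | exact PySem.Dict.nodup_keys_insert _ _ _ h

lemma pvFold_posInv (n_start : Int) (l : List (Int × Int)) (d : PySem.Dict Int Int)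
    (h : pvPosInv d) : pvPosInv (l.foldl (pvStepP n_start) d) := by
  induction l generalizing d with
  | nil => exact h
  | cons p l ih =>
    refine ih _ ?_
    rcases p with ⟨a, b⟩
    simp only [pvStepP, pvStep]
    split_ifs with h1 h2
    · exact h
    · -- inserted a value y with d.getD key 0 < y; y > 0 since getD ≥ 0
      have hy0 : (0 : Int) ≤ d.getD (a * b - a - b) 0 := by
        by_cases hm : (a * b - a - b) ∈ d.keys
        · exact le_of_lt ((h _).mp hm)
        · have : d.get? (a * b - a - b) = none :=
            (PySem.Dict.get?_eq_none_iff_not_mem_keys _ _).mpr hm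
          simp [PySem.Dict.getD_eq_get?_getD, this]
      intro z
      by_cases hz : z = a * b - a - b
      · subst hz
        simp [PySem.Dict.mem_keys_insert, PySem.Dict.getD_insert_self]
        omega
      · simp [PySem.Dict.mem_keys_insert, hz,
          PySem.Dict.getD_insert_of_ne _ _ _ hz, h z]
    · exact h

lemma pvComputeMaxY_eq (n_start nl : Int) :
    pvComputeMaxY n_start nl
      = (pvPairs nl (pvIsqrt nl)).foldl (pvStepP n_start) PySem.Dict.empty := by
  simp only [pvComputeMaxY, pvPairs, List.foldl_flatMap, List.foldl_map, pvStepP]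

-- positivity of a conditional-max fold forces a positive hit
lemma pvFold_pos_hit (c : Int × Int → Prop) [DecidablePred c] (v : Int × Int → Int)
    (l : List (Int × Int)) (init : Int)
    (h : 0 < l.foldl (fun m p => if c p then max m (v p) else m) init) :
    0 < init ∨ ∃ p ∈ l, c p ∧ 0 < v p := by
  induction l generalizing init with
  | nil => exact Or.inl h
  | cons p l ih =>
    simp only [List.foldl_cons] at h
    rcases ih _ h with h' | ⟨q, hq, hc, hv⟩
    · by_cases hcp : c p
      · simp only [hcp, if_pos] at h'
        rcases lt_max_iff.mp h' with h1 | h1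
        · exact Or.inl h1
        · exact Or.inr ⟨p, List.mem_cons_self, hcp, h1⟩
      · simp only [hcp, if_neg, not_false_iff] at h'
        exact Or.inl h'
    · exact Or.inr ⟨q, List.mem_cons_of_mem _ hq, hc, hv⟩

-- single-hit fold over any list
lemma pvFold_max_single (l : List Int) (b0 v m : Int) :
    l.foldl (fun m b => if b = b0 then max m v else m) m
      = if b0 ∈ l then max m v else m := by
  induction l generalizing m with
  | nil => simp
  | cons a l ih =>
    simp only [List.foldl_cons, ih, List.mem_cons]
    by_cases ha : a = b0
    · subst ha
      rw [if_pos rfl, if_pos (Or.inl rfl)]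
      by_cases hm : a ∈ l <;> simp [hm]
    · have : ¬ b0 = a := fun h => ha h.symm
      simp [ha, this]

-- the inner b-loop for a fixed a ≥ 2, target x ≥ 2
lemma pvInner_eval (n_start L x a m : Int) (ha : 2 ≤ a) (hx2 : 2 ≤ x) (hxs : n_start ≤ x) :
    (PySem.List.pyRange (a + 1) (L - a + 1)).foldl (fun m b => pvG n_start x m (a, b)) m
      = if PySem.Int.mod (x + 1) (a - 1) = 0 ∧
            (a + 1 ≤ PySem.Int.floordiv (x + 1) (a - 1) + 1 ∧
             PySem.Int.floordiv (x + 1) (a - 1) + 1 ≤ L - a)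
        then max m (x * (a * a + (PySem.Int.floordiv (x + 1) (a - 1) + 1))) else m := by
  have ha1 : (0 : Int) < a - 1 := by omega
  have hmod : PySem.Int.mod (x + 1) (a - 1) = (x + 1) % (a - 1) := by
    simp only [PySem.Int.mod, Int.fmod_eq_emod]
    rw [if_pos (Or.inl ha1.le)]; ring
  have hdiv : PySem.Int.floordiv (x + 1) (a - 1) = (x + 1) / (a - 1) := by
    simp only [PySem.Int.floordiv, Int.fdiv_eq_ediv]
    rw [if_pos (Or.inl ha1.le)]; ring
  by_cases hd : (a - 1) ∣ (x + 1)
  · set q : Int := (x + 1) / (a - 1) with hq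
    have hqe : (a - 1) * q = x + 1 := Int.mul_ediv_cancel' hd
    have hkey : ∀ b : Int, a * b - a - b = x ↔ b = q + 1 := by
      intro b
      constructor
      · intro hk
        have h1 : (a - 1) * (b - 1) = x + 1 := by ring_nf; ring_nf at hk; omega
        have h2 : (a - 1) * (b - 1) = (a - 1) * q := by rw [h1, hqe]
        have := mul_left_cancel₀ (by omega : (a - 1 : Int) ≠ 0) h2
        omega
      · rintro rfl
        linear_combination hqe
    rw [PySem.List.foldl_congr_mem _ _
        (fun m b => if b = q + 1 then max m (x * (a * a + (q + 1))) else m) m ?_]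
    · rw [pvFold_max_single]
      simp only [PySem.List.mem_pyRange_one, hmod, hdiv,
        Int.emod_eq_zero_of_dvd hd]
      have hiff : (a + 1 ≤ q + 1 ∧ q + 1 < L - a + 1) ↔
          ((0 : Int) = 0 ∧ a + 1 ≤ q + 1 ∧ q + 1 ≤ L - a) := by omega
      simp only [hiff]
    · intro acc b hb
      rw [PySem.List.mem_pyRange_one] at hb
      simp only [pvG, pvKey]
      by_cases hbq : b = q + 1
      · subst hbq
        have hkx : a * (q + 1) - a - (q + 1) = x := (hkey (q + 1)).mpr rfl
        rw [if_pos ⟨by simp only [hkx]; omega, hkx⟩, if_pos rfl]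
        simp only [pvY, pvKey, hkx]
        rw [abs_of_nonneg (by nlinarith [mul_self_nonneg a, hb.1])]
      · rw [if_neg, if_neg hbq]
        rintro ⟨-, hk⟩
        exact hbq ((hkey b).mp hk)
  · rw [hmod]
    rw [if_neg (by intro hh; exact hd (Int.dvd_of_emod_eq_zero hh.1))]
    rw [PySem.List.foldl_congr_mem _ _ (fun m _ => m) m ?_, PySem.List.foldl_ignore]
    intro acc b hb
    simp only [pvG, pvKey]
    rw [if_neg]
    rintro ⟨-, hk⟩
    exact hd ⟨b - 1, by ring_nf; ring_nf at hk; omega⟩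

-- the inner b-loop for a ∈ {0, 1} contributes nothing when x ≥ 2
lemma pvInner_low (n_start L x a m : Int) (ha : a = 0 ∨ a = 1) (hx2 : 2 ≤ x) :
    (PySem.List.pyRange (a + 1) (L - a + 1)).foldl (fun m b => pvG n_start x m (a, b)) m = m := by
  rw [PySem.List.foldl_congr_mem _ _ (fun m _ => m) m ?_, PySem.List.foldl_ignore]
  intro acc b hb
  rw [PySem.List.mem_pyRange_one] at hb
  simp only [pvG, pvKey]
  rw [if_neg]
  rintro ⟨-, hk⟩
  rcases ha with rfl | rfl <;> ring_nf at hk <;> omega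

-- the whole pair fold equals x times B's divisor scan
lemma pvFold_eq_best (n_start L R x : Int) (hx2 : 2 ≤ x) (hxs : n_start ≤ x) :
    (pvPairs L R).foldl (pvG n_start x) 0 = x * pvBestOf L R x := by
  simp only [pvPairs, List.foldl_flatMap, List.foldl_map, pvBestOf]
  by_cases hR : R ≤ 2
  · rw [PySem.List.foldl_congr_mem _ _ (fun m _ => m) 0 ?_, PySem.List.foldl_ignore,
      PySem.List.pyRange_one_eq_nil (by omega : R ≤ 2)]
    · simp
    · intro acc a hamem
      rw [PySem.List.mem_pyRange_one] at hamem
      exact pvInner_low n_start L x a acc (by omega) hx2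
  · rw [PySem.List.pyRange_one_append 0 2 R (by omega) (by omega), List.foldl_append]
    have h01 : PySem.List.pyRange 0 2 = [0, 1] := by decide
    rw [h01]
    simp only [List.foldl_cons, List.foldl_nil]
    rw [pvInner_low n_start L x 0 0 (Or.inl rfl) hx2,
        pvInner_low n_start L x 1 0 (Or.inr rfl) hx2]
    rw [PySem.List.foldl_congr_mem _ _
        (fun m a => if PySem.Int.mod (x + 1) (a - 1) = 0 ∧
            (a + 1 ≤ PySem.Int.floordiv (x + 1) (a - 1) + 1 ∧
             PySem.Int.floordiv (x + 1) (a - 1) + 1 ≤ L - a)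
          then max m (x * (a * a + (PySem.Int.floordiv (x + 1) (a - 1) + 1))) else m) 0 ?_]
    · have hhom := List.foldl_hom (f := (x * ·))
        (g₁ := fun best a =>
          if PySem.Int.mod (x + 1) (a - 1) = 0 then
            if a + 1 ≤ PySem.Int.floordiv (x + 1) (a - 1) + 1 ∧
                PySem.Int.floordiv (x + 1) (a - 1) + 1 ≤ L - a then
              if best < a * a + (PySem.Int.floordiv (x + 1) (a - 1) + 1) then
                a * a + (PySem.Int.floordiv (x + 1) (a - 1) + 1)
              else best
            else best
          else best)
        (g₂ := fun m a =>
          if PySem.Int.mod (x + 1) (a - 1) = 0 ∧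
              (a + 1 ≤ PySem.Int.floordiv (x + 1) (a - 1) + 1 ∧
               PySem.Int.floordiv (x + 1) (a - 1) + 1 ≤ L - a)
            then max m (x * (a * a + (PySem.Int.floordiv (x + 1) (a - 1) + 1))) else m)
        (l := PySem.List.pyRange 2 R) (init := 0) ?_
      · rw [mul_zero] at hhom
        exact hhom
      intro best a
      simp only []
      by_cases hm : PySem.Int.mod (x + 1) (a - 1) = 0
      · by_cases hb : a + 1 ≤ PySem.Int.floordiv (x + 1) (a - 1) + 1 ∧
            PySem.Int.floordiv (x + 1) (a - 1) + 1 ≤ L - a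
        · rw [if_pos ⟨hm, hb⟩, if_pos hm, if_pos hb]
          have hmax : (if best < a * a + (PySem.Int.floordiv (x + 1) (a - 1) + 1)
              then a * a + (PySem.Int.floordiv (x + 1) (a - 1) + 1) else best)
              = max best (a * a + (PySem.Int.floordiv (x + 1) (a - 1) + 1)) := by
            split_ifs <;> omega
          rw [hmax, mul_max_of_nonneg _ _ (by omega : (0 : Int) ≤ x)]
        · rw [if_neg (by tauto), if_pos hm, if_neg hb]
      · rw [if_neg (by tauto), if_neg hm]
    · intro acc a hamem
      rw [PySem.List.mem_pyRange_one] at hamem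
      exact pvInner_eval n_start L x a acc (by omega) hx2 hxs

-- any admissible pair keeps x below B's scan bound
lemma pvHit_le_hi (L R x a b : Int) (hRL : R * R ≤ L) (ha2 : 2 ≤ a) (haR : a < R)
    (hb1 : a + 1 ≤ b) (hb2 : b ≤ L - a) (hx : a * b - a - b = x) :
    x ≤ (R - 2) * (L - R) - 1 := by
  have hR3 : 3 ≤ R := by omega
  have h2R : 2 * R ≤ L := by nlinarith
  have h1 : x + 1 = (a - 1) * (b - 1) := by linear_combination -hx
  have h2 : (a - 1) * (b - 1) ≤ (a - 1) * (L - a - 1) :=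
    mul_le_mul_of_nonneg_left (by omega) (by omega)
  have h3 : (a - 1) * (L - a - 1) ≤ (R - 2) * (L - R) := by
    nlinarith [mul_nonneg (show (0 : Int) ≤ R - 1 - a by omega)
      (show (0 : Int) ≤ L - a - R + 1 by omega)]
  omega

-- key set characterisation
lemma pvMem_keys (n_start n_end : Int) (hne : 0 ≤ n_end) (x : Int) :
    x ∈ (pvComputeMaxY n_start (n_end * 2)).keys ↔
      (max n_start 2 ≤ x ∧
       x ≤ (if 3 ≤ pvIsqrt (n_end * 2) then
              (pvIsqrt (n_end * 2) - 2) * (n_end * 2 - pvIsqrt (n_end * 2)) - 1 else 1) ∧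
       0 < pvBestOf (n_end * 2) (pvIsqrt (n_end * 2)) x) := by
  have hL0 : (0 : Int) ≤ n_end * 2 := by omega
  have hRR : pvIsqrt (n_end * 2) * pvIsqrt (n_end * 2) ≤ n_end * 2 := by
    simp only [pvIsqrt]
    have h := Nat.sqrt_le' (n_end * 2).toNat
    have h2 : ((Nat.sqrt (n_end * 2).toNat : Int)) ^ 2 ≤ (((n_end * 2).toNat : Nat) : Int) := by
      exact_mod_cast h
    rw [Int.toNat_of_nonneg hL0] at h2
    nlinarith [h2]
  have hinv : pvPosInv (pvComputeMaxY n_start (n_end * 2)) := by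
    rw [pvComputeMaxY_eq]
    apply pvFold_posInv
    intro z
    simp [PySem.Dict.keys_empty, PySem.Dict.getD_empty]
  have hgd : ∀ z : Int, (pvComputeMaxY n_start (n_end * 2)).getD z 0
      = (pvPairs (n_end * 2) (pvIsqrt (n_end * 2))).foldl (pvG n_start z) 0 := by
    intro z
    rw [pvComputeMaxY_eq, pvFold_getD]
    simp [PySem.Dict.getD_empty]
  rw [hinv x, hgd x]
  constructor
  · intro hpos
    rcases pvFold_pos_hit (fun p => ¬(pvKey p < n_start ∨ pvKey p = 1) ∧ pvKey p = x) pvY _ 0 hpos with h0 | ⟨p, hp, hc, hv⟩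
    · exact absurd h0 (lt_irrefl 0)
    · simp only [pvPairs, List.mem_flatMap, List.mem_map] at hp
      rcases hp with ⟨a, hamem, b, hbmem, rfl⟩
      rw [PySem.List.mem_pyRange_one] at hamem hbmem
      obtain ⟨hno, hkx⟩ := hc
      simp only [pvKey] at hkx
      simp only [pvY, pvKey] at hv
      rw [hkx] at hv
      have hxpos : 0 < x := by nlinarith [abs_nonneg (a * a + b), hv]
      simp only [pvKey] at hno
      rw [hkx] at hno
      rw [not_or] at hno
      have hx2 : 2 ≤ x := by omega
      have ha2 : 2 ≤ a := by
        by_cases ha0 : a = 0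
        · subst ha0; ring_nf at hkx; omega
        · by_cases ha1 : a = 1
          · subst ha1; ring_nf at hkx; omega
          · omega
      have hR3 : 3 ≤ pvIsqrt (n_end * 2) := by omega
      refine ⟨by omega, ?_, ?_⟩
      · rw [if_pos hR3]
        exact pvHit_le_hi (n_end * 2) (pvIsqrt (n_end * 2)) x a b hRR ha2 (by omega)
          (by omega) (by omega) hkx
      · rw [pvFold_eq_best n_start _ _ x hx2 (by omega)] at hpos
        nlinarith [hpos]
  · rintro ⟨hlo, hhi, hbest⟩
    rw [pvFold_eq_best n_start _ _ x (by omega) (by omega)]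
    exact mul_pos (by omega) hbest

lemma pvSorted_keys (n_start n_end : Int) (hne : 0 ≤ n_end) :
    PySem.List.sorted (pvComputeMaxY n_start (n_end * 2)).keys (fun k => k)
      = (PySem.List.pyRange (max n_start 2)
          ((if 3 ≤ pvIsqrt (n_end * 2) then
              (pvIsqrt (n_end * 2) - 2) * (n_end * 2 - pvIsqrt (n_end * 2)) - 1 else 1) + 1)).filter
          (fun x => decide (0 < pvBestOf (n_end * 2) (pvIsqrt (n_end * 2)) x)) := by
  apply PySem.List.sorted_eq_of_perm_of_pairwise_lt
  · rw [List.perm_ext_iff_of_nodup]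
    · intro z
      rw [List.mem_filter, PySem.List.mem_pyRange_one, pvMem_keys n_start n_end hne z]
      simp only [decide_eq_true_eq]
      constructor
      · rintro ⟨⟨h1, h2⟩, h3⟩
        exact ⟨h1, by omega, h3⟩
      · rintro ⟨h1, h2, h3⟩
        exact ⟨⟨h1, by omega⟩, h3⟩
    · exact (PySem.List.nodup_pyRange_one _ _).filter _
    · rw [pvComputeMaxY_eq]
      apply pvFold_nodup
      simp [PySem.Dict.keys_empty]
  · exact (PySem.List.pairwise_lt_pyRange_one _ _).filter _

lemma pvBLoop_neg (n_end L R hi x count : Int) (res : List Int)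
    (h : ¬(x ≤ hi ∧ count < n_end)) : pvBLoop n_end L R hi x count res = res := by
  rw [pvBLoop, dif_neg h]

lemma pvBLoop_pos (n_end L R hi x count : Int) (res : List Int)
    (h : x ≤ hi ∧ count < n_end) : pvBLoop n_end L R hi x count res =
    (if 0 < pvBestOf L R x then
       (if pvIsqrt (x * pvBestOf L R x + 9) * pvIsqrt (x * pvBestOf L R x + 9)
            = x * pvBestOf L R x + 9
        then pvBLoop n_end L R hi (x + 1) (count + 1) res
        else pvBLoop n_end L R hi (x + 1) (count + 1) (res ++ [count + 1]))
     else pvBLoop n_end L R hi (x + 1) count res) := by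
  rw [pvBLoop, dif_pos h]

lemma pvALoop_stop (n_end : Int) (d : PySem.Dict Int Int) (l : List Int) (idx : Int)
    (acc : List Int) (h : n_end ≤ idx) : pvALoop n_end d l idx acc = acc := by
  cases l with
  | nil => rfl
  | cons x rest => simp only [pvALoop]; rw [if_pos (by omega)]

-- the two tail loops agree (for any bound hi)
lemma pvLoop_eq (n_start n_end hi : Int) (hne : 0 ≤ n_end) :
    ∀ (n : Nat) (x0 c : Int) (acc : List Int),
      (hi + 1 - x0).toNat = n → max n_start 2 ≤ x0 →
      pvALoop n_end (pvComputeMaxY n_start (n_end * 2))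
          ((PySem.List.pyRange x0 (hi + 1)).filter
            (fun x => decide (0 < pvBestOf (n_end * 2) (pvIsqrt (n_end * 2)) x))) c acc
        = pvBLoop n_end (n_end * 2) (pvIsqrt (n_end * 2)) hi x0 c acc := by
  intro n
  induction n with
  | zero =>
    intro x0 c acc hfuel hlo
    rw [PySem.List.pyRange_one_eq_nil (by omega), List.filter_nil,
        pvBLoop_neg _ _ _ _ _ _ _ (by omega)]
    rfl
  | succ n ih =>
    intro x0 c acc hfuel hlo
    by_cases hx : hi < x0
    · rw [PySem.List.pyRange_one_eq_nil (by omega), List.filter_nil,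
          pvBLoop_neg _ _ _ _ _ _ _ (by omega)]
      rfl
    · have hgd : (pvComputeMaxY n_start (n_end * 2)).getD x0 0
          = x0 * pvBestOf (n_end * 2) (pvIsqrt (n_end * 2)) x0 := by
        rw [pvComputeMaxY_eq, pvFold_getD]
        have h0 : (PySem.Dict.empty : PySem.Dict Int Int).getD x0 0 = 0 := by
          simp [PySem.Dict.getD_empty]
        rw [h0]
        exact pvFold_eq_best n_start _ _ x0 (by omega) (by omega)
      rw [PySem.List.pyRange_one_cons (by omega : x0 < hi + 1), List.filter_cons]
      by_cases hbp : 0 < pvBestOf (n_end * 2) (pvIsqrt (n_end * 2)) x0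
      · rw [if_pos (by simpa using hbp)]
        by_cases hc : c < n_end
        · rw [pvBLoop_pos _ _ _ _ _ _ _ ⟨by omega, hc⟩, if_pos hbp]
          simp only [pvALoop, pvIsSq]
          rw [if_neg (show ¬ n_end < c + 1 by omega), hgd]
          by_cases hsq : pvIsqrt (x0 * pvBestOf (n_end * 2) (pvIsqrt (n_end * 2)) x0 + 9) *
              pvIsqrt (x0 * pvBestOf (n_end * 2) (pvIsqrt (n_end * 2)) x0 + 9)
              = x0 * pvBestOf (n_end * 2) (pvIsqrt (n_end * 2)) x0 + 9
          · rw [if_pos (by simpa using hsq), if_pos hsq]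
            exact ih (x0 + 1) (c + 1) acc (by omega) (by omega)
          · rw [if_neg (by simpa using hsq), if_neg hsq]
            exact ih (x0 + 1) (c + 1) (acc ++ [c + 1]) (by omega) (by omega)
        · rw [pvBLoop_neg _ _ _ _ _ _ _ (by tauto)]
          exact pvALoop_stop _ _ _ _ _ (by omega)
      · rw [if_neg (by simpa using hbp)]
        by_cases hc : c < n_end
        · rw [pvBLoop_pos _ _ _ _ _ _ _ ⟨by omega, hc⟩, if_neg hbp]
          exact ih (x0 + 1) c acc (by omega) (by omega)
        · rw [pvBLoop_neg _ _ _ _ _ _ _ (by tauto)]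
          exact pvALoop_stop _ _ _ _ _ (by omega)

-- ===== VERDICT (by name: the statement is the Claim_ definition above) =====
theorem generate_a079524_indices_spec : Claim_equal_generate_a079524_indices := by
  intro n_start n_end hdom hpre
  have hne : (0 : Int) ≤ n_end := hpre
  show generate_a079524_indices n_start n_end = generate_a079524_indices_alt n_start n_end
  unfold generate_a079524_indices generate_a079524_indices_alt
  simp only []
  rw [pvSorted_keys n_start n_end hne]
  have h2 : (2 : Int) * n_end = n_end * 2 := mul_comm 2 n_end
  rw [h2, if_pos (show (0 : Int) ≤ n_end * 2 by omega)]
  exact pvLoop_eq n_start n_end _ hne _ (max n_start 2) 0 [] rfl (le_refl _)
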